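-- pv_equiv track=rewrite | github.com/boostcamp-5th-NLP05/programmers-study | youngjun/9_야근 지수.py | solution
-- ===== SOURCE A (Python) =====
-- def solution(n, works):
--     answer = 0
--
--     if sum(works) <= n:
--         return 0
--     works.sort(reverse=True) #내림차순 정렬
--
--     for i in range(len(works)-1):
--         if n <= 0:
--             break
--
--         tmp = works[i] - works[i+1] #다음에 올 숫자랑 비교
--
--         if tmp == 0: #다음 숫자랑 같다면 다음
--             continue
--
--         else:
--             if n > (i+1) * tmp: #n이 (지금까지 본 숫자 개수) * (다음 숫자와의 차이) 보다 클 때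
--                 for j in range(i+1):
--                     works[j] -= tmp
--                 n -= (i+1) * tmp
--
--             else: #작다면
--                 for j in range(i+1):
--                     works[j] -= n//(i+1)
--                 for j in range(n % (i+1)):
--                     works[j] -= 1
--                 n = 0
--                 break
--
--     if n > 0: #모든 숫자가 같아지고, n이 남아있을 때
--         for j in range(len(works)):
--             works[j] -= n//len(works)
--         for j in range(n % len(works)):
--             works[j] -= 1
--
--     for i in works:
--         answer += i**2
--
--     return answer
-- ===== SOURCE B (Python) =====
-- def solution(n, works):
--     # Return-value equivalence only: A sorts `works` in place, B leaves it untouched.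
--     if sum(works) <= n:
--         return 0
--     sq = sum(w * w for w in works)
--     if n <= 0:
--         return sq
--     ws = sorted(works, reverse=True)
--     k = len(ws)
--     removed = 0       # units removed when clipping ws[:i+1] down to level ws[i]
--     tail_sq = sq      # sum of squares of ws[i:]
--     i = 0
--     while i < k - 1 and removed + (i + 1) * (ws[i] - ws[i + 1]) < n:
--         tail_sq -= ws[i] * ws[i]
--         removed += (i + 1) * (ws[i] - ws[i + 1])
--         i += 1
--     # the final level L lies in the plateau just below ws[i]; m elements get clipped
--     m = i + 1
--     tail_sq -= ws[i] * ws[i]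
--     d = -((removed - n) // m)          # ceil((n - removed) / m) >= 1
--     L = ws[i] - d
--     s = removed + m * d - n            # elements ending at L + 1 (0 <= s < m)
--     return tail_sq + s * (L + 1) ** 2 + (m - s) * L ** 2
-- ===== Notes on version B (the rewrite author's own statement) =====
-- stated objective: alternative
-- what changed: A repeatedly levels the sorted list in place with nested index loops; B sorts once and makes a single aggregate scan over plateau boundaries keeping only (index, units removed, tail square-sum), then gets the answer from one closed-form ceiling division instead of per-element subtraction; intended as asymptotically faster (O(k log k) vs O(k^2) element updates), but a timing run measured only 1.35x at the largest generated size, so no speed is claimed; return value only: A additionally sorts `works` in place, B does not mutate it.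
import Mathlib
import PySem

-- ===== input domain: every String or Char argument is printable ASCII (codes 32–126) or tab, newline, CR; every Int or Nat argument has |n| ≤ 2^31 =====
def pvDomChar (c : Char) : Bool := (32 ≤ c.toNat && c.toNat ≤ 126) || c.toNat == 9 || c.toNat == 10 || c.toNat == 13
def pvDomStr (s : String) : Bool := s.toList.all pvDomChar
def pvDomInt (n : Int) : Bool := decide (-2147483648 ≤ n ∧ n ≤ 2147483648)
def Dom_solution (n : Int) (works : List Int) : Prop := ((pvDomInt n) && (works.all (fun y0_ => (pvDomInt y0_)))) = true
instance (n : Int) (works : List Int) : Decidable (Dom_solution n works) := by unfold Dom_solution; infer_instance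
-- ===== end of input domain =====

-- B replaces A's nested in-place plateau levelling by a sort + one aggregate scan + a
-- closed-form division at the cutoff level (equivalence is about the RETURN value only:
-- A sorts `works` in place, B leaves its argument untouched).

-- ===== PORT A =====
-- 'works[j] -= c' for j in range(0, r): read works[j], write it back decreased (indices from range are in bounds)
def pvSubRange (ws : List Int) (r c : Int) : List Int :=
  (PySem.List.pyRange 0 r 1).foldl
    (fun w j => PySem.List.pySetD w j (PySem.List.pyGetD w j 0 - c)) ws

-- the 'for i in range(len(works)-1)' loop; state (works, n); returning without recursing = break
def pvLoopA : List Int → List Int × Int → List Int × Int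
  | [], st => st
  | i :: rest, (ws, n) =>
    if n ≤ 0 then (ws, n)
    else
      let tmp := PySem.List.pyGetD ws i 0 - PySem.List.pyGetD ws (i + 1) 0
      if tmp = 0 then pvLoopA rest (ws, n)
      else if n > (i + 1) * tmp then
        pvLoopA rest (pvSubRange ws (i + 1) tmp, n - (i + 1) * tmp)
      else
        (pvSubRange (pvSubRange ws (i + 1) (PySem.Int.floordiv n (i + 1)))
          (PySem.Int.mod n (i + 1)) 1, 0)

-- the post-loop 'if n > 0' levelling
def pvPost (st : List Int × Int) : List Int :=
  if st.2 > 0 then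
    pvSubRange
      (pvSubRange st.1 (st.1.length : Int) (PySem.Int.floordiv st.2 (st.1.length : Int)))
      (PySem.Int.mod st.2 (st.1.length : Int)) 1
  else st.1

def solution (n : Int) (works : List Int) : Int :=
  if works.sum ≤ n then 0
  else
    let ws := PySem.List.sorted works (fun x => x) true
    (pvPost (pvLoopA (PySem.List.pyRange 0 ((ws.length : Int) - 1) 1) (ws, n))).foldl
      (fun a i => a + i ^ 2) 0

-- ===== PORT B =====
-- Source B's while loop: advance while clipping one level further still removes < n units
def pvLoopB (ws : List Int) (n : Int) (k i : Nat) (removed tailSq : Int) : Nat × Int × Int :=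
  if _h : i < k - 1 then
    let wi := PySem.List.pyGetD ws (i : Int) 0
    let wi1 := PySem.List.pyGetD ws ((i : Int) + 1) 0
    if removed + ((i : Int) + 1) * (wi - wi1) < n then
      pvLoopB ws n k (i + 1) (removed + ((i : Int) + 1) * (wi - wi1)) (tailSq - wi * wi)
    else (i, removed, tailSq)
  else (i, removed, tailSq)
termination_by k - 1 - i

-- Source B's closing closed form from the loop's final (i, removed, tail_sq)
def pvFinishB(ws : List Int) (n : Int) (st : Nat × Int × Int) : Int :=
  let m : Int := (st.1 : Int) + 1
  let wi := PySem.List.pyGetD ws (st.1 : Int) 0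
  let tailSq := st.2.2 - wi * wi
  let d := -(PySem.Int.floordiv (st.2.1 - n) m)
  let L := wi - d
  let s := st.2.1 + m * d - n
  tailSq + s * (L + 1) ^ 2 + (m - s) * L ^ 2

def solution_alt (n : Int) (works : List Int) : Int :=
  if works.sum ≤ n then 0
  else
    let sq := (works.map (fun w => w * w)).sum
    if n ≤ 0 then sq
    else
      let ws := PySem.List.sorted works (fun x => x) true
      pvFinishB ws n (pvLoopB ws n ws.length 0 0 sq)

-- ===== PRECONDITION & SPEC =====
def Spec_solution (n : Int) (works : List Int) (out : Int) : Prop := out = solution_alt n works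
instance (n : Int) (works : List Int) (out : Int) : Decidable (Spec_solution n works out) := by unfold Spec_solution; infer_instance

-- ===== CLAIM (what is proved, stated in full; the proofs are below) =====
def Claim_equal_solution : Prop := ∀ (n : Int) (works : List Int), Dom_solution n works → Spec_solution n works (solution n works)

-- ===== LEMMAS AND PROOFS =====

lemma pv_sqfold (l : List Int) (c : Int) :
    l.foldl (fun a i => a + i ^ 2) c = c + (l.map (fun w => w * w)).sum := by
  induction l generalizing c with
  | nil => simp
  | cons x xs ih => simp [List.foldl_cons, ih]; ring

lemma pv_subRange_replicate (c v : Int) (t : List Int) (r m : Nat) (h : r ≤ m) :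
    pvSubRange (List.replicate m v ++ t) (r : Int) c =
      List.replicate r (v - c) ++ List.replicate (m - r) v ++ t := by
  induction r with
  | zero => simp [pvSubRange]
  | succ r ih =>
    have hsplit : PySem.List.pyRange 0 ((r : Int) + 1) 1
        = PySem.List.pyRange 0 (r : Int) 1 ++ [(r : Int)] :=
      PySem.List.pyRange_one_succ_right (show (0:Int) ≤ (r:Int) by omega)
    have hrm : r < m := by omega
    unfold pvSubRange
    push_cast
    rw [hsplit, List.foldl_append]
    have hih := ih (le_of_lt hrm)
    unfold pvSubRange at hih
    rw [hih]
    have hstep : ∀ (p s : List Int) (x : Int),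
        PySem.List.pySetD (p ++ x :: s) ((p.length : Nat) : Int)
          (PySem.List.pyGetD (p ++ x :: s) ((p.length : Nat) : Int) 0 - c) = p ++ (x - c) :: s := by
      intro p s x
      rw [PySem.List.pyGetD_natCast, PySem.List.pySetD_natCast]
      simp [List.getD]
    have hsplit2 : List.replicate (m - r) v ++ t = v :: (List.replicate (m - r - 1) v ++ t) := by
      have hmr : m - r = (m - r - 1) + 1 := by omega
      rw [hmr, List.replicate_succ]; simp
    simp only [List.foldl_cons, List.foldl_nil]
    simp only [List.append_assoc]
    rw [hsplit2]
    have hs := hstep (List.replicate r (v - c)) (List.replicate (m - r - 1) v ++ t) v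
    simp only [List.length_replicate] at hs
    rw [hs]
    have hmr2 : m - (r + 1) = m - r - 1 := by omega
    rw [hmr2, List.replicate_succ']
    simp [List.append_assoc]

lemma pv_finish (m : Nat) (hm : 0 < m) (ni v : Int) (hni : 0 < ni) (t : List Int) :
    ((List.replicate (PySem.Int.mod ni m).toNat (v - PySem.Int.floordiv ni m - 1) ++
        List.replicate (m - (PySem.Int.mod ni m).toNat) (v - PySem.Int.floordiv ni m) ++ t).map
          (fun w => w * w)).sum =
      (t.map (fun w => w * w)).sum +
        ((m : Int) * (-(PySem.Int.floordiv (-ni) m)) - ni) *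
          ((v - (-(PySem.Int.floordiv (-ni) m))) + 1) ^ 2 +
        ((m : Int) - ((m : Int) * (-(PySem.Int.floordiv (-ni) m)) - ni)) *
          (v - (-(PySem.Int.floordiv (-ni) m))) ^ 2 := by
  have hM : (0:Int) < (m:Int) := by exact_mod_cast hm
  have hqr := PySem.Int.floordiv_mul_add_mod ni (m : Int)
  have hr0 := PySem.Int.mod_nonneg ni (b := (m:Int)) hM
  have hrM := PySem.Int.mod_lt ni (b := (m:Int)) hM
  have hfd : PySem.Int.floordiv (-ni) (m:Int) =
      if PySem.Int.mod ni (m:Int) = 0 then -(PySem.Int.floordiv ni (m:Int))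
      else -(PySem.Int.floordiv ni (m:Int)) - 1 := by
    rcases eq_or_ne (PySem.Int.mod ni (m:Int)) 0 with h0 | h0
    · rw [if_pos h0, (PySem.Int.floordiv_eq_iff_of_pos hM)]
      constructor <;> nlinarith
    · rw [if_neg h0, (PySem.Int.floordiv_eq_iff_of_pos hM)]
      constructor <;> nlinarith [lt_of_le_of_ne hr0 (Ne.symm h0)]
  obtain ⟨q, hq⟩ : ∃ q, PySem.Int.floordiv ni (m:Int) = q := ⟨_, rfl⟩
  obtain ⟨r, hr⟩ : ∃ r, PySem.Int.mod ni (m:Int) = r := ⟨_, rfl⟩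
  simp only [hq, hr] at hqr hr0 hrM hfd ⊢
  rw [hfd]
  clear hq hr hfd
  have hle : r.toNat ≤ m := by omega
  have hcast : ((m - r.toNat : Nat) : Int) = (m:Int) - r := by omega
  have hrcast : (r.toNat : Int) = r := by omega
  have hni' : ni = q * (m:Int) + r := by linarith
  subst hni'
  simp only [List.map_append, List.sum_append, List.map_replicate, List.sum_replicate,
    nsmul_eq_mul]
  rw [hcast, hrcast]
  rcases eq_or_ne r 0 with h0 | h0
  · rw [if_pos h0, h0]; ring
  · rw [if_neg h0]; ring

-- reading the levelled prefix state
lemma pv_state_get_lt (i m : Nat) (v : Int) (t : List Int) (h : i < m) :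
    PySem.List.pyGetD (List.replicate m v ++ t) (i : Int) 0 = v := by
  rw [PySem.List.pyGetD_natCast]
  simp [List.getD, List.getElem?_append, h]

lemma pv_state_get_next (m : Nat) (v : Int) (t : List Int) :
    PySem.List.pyGetD (List.replicate m v ++ t) ((m : Nat) : Int) 0 = t[0]?.getD 0 := by
  rw [PySem.List.pyGetD_natCast]
  rw [List.getD, List.getElem?_append_right (by simp)]
  simp

-- merging the next element into the levelled prefix
lemma pv_merge (i : Nat) (w : Int) (ws0 : List Int) (h : i + 1 < ws0.length)
    (hw : ws0[i+1]?.getD 0 = w) :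
    List.replicate (i + 1) w ++ ws0.drop (i + 1) =
      List.replicate (i + 2) w ++ ws0.drop (i + 2) := by
  have hd : ws0.drop (i + 1) = w :: ws0.drop (i + 2) := by
    rw [List.drop_eq_getElem_cons h]
    simp [List.getElem?_eq_getElem h] at hw
    rw [hw]
  rw [hd, show i + 2 = (i+1) + 1 from rfl, List.replicate_succ' (n := i+1)]
  simp

lemma pv_main (ws0 : List Int) (n0 : Int) :
    ∀ (j i : Nat), ws0.length - 1 - i = j → i < ws0.length → ∀ (R : Int), R < n0 →
      ∀ (T : Int), T = ((ws0.drop i).map (fun w => w * w)).sum →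
    (pvPost (pvLoopA (PySem.List.pyRange (i : Int) ((ws0.length : Int) - 1) 1)
        (List.replicate (i + 1) (ws0[i]?.getD 0) ++ ws0.drop (i + 1), n0 - R))).foldl
        (fun a x => a + x ^ 2) 0 =
      pvFinishB ws0 n0 (pvLoopB ws0 n0 ws0.length i R T) := by
  intro j
  induction j with
  | zero =>
    intro i hj hik R hR T hT
    have hk : 1 ≤ ws0.length := by omega
    have hi : i = ws0.length - 1 := by omega
    have hrange : PySem.List.pyRange (i : Int) ((ws0.length : Int) - 1) 1 = [] :=
      PySem.List.pyRange_one_eq_nil (by omega)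
    have hnil : ws0.drop (i + 1) = [] := List.drop_eq_nil_of_le (by omega)
    rw [hrange, hnil]
    simp only [pvLoopA, pvPost]
    rw [if_pos (show n0 - R > 0 by omega)]
    have hlen : ((List.replicate (i + 1) (ws0[i]?.getD 0) ++ ([] : List Int)).length : Int)
        = ((i + 1 : Nat) : Int) := by simp
    rw [hlen]
    rw [pv_subRange_replicate _ _ _ (i+1) (i+1) (Nat.le_refl _)]
    have hshape : List.replicate (i+1) (ws0[i]?.getD 0 - PySem.Int.floordiv (n0 - R) ((i+1 : Nat) : Int))
          ++ List.replicate ((i+1) - (i+1)) (ws0[i]?.getD 0) ++ ([] : List Int)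
        = List.replicate (i+1) (ws0[i]?.getD 0 - PySem.Int.floordiv (n0 - R) ((i+1 : Nat) : Int))
          ++ ([] : List Int) := by simp
    rw [hshape]
    have hmodcast : PySem.Int.mod (n0 - R) ((i + 1 : Nat) : Int)
        = (((PySem.Int.mod (n0 - R) ((i + 1 : Nat) : Int)).toNat : Nat) : Int) := by
      have := PySem.Int.mod_nonneg (n0 - R) (b := ((i + 1 : Nat) : Int)) (by omega)
      omega
    rw [hmodcast, pv_subRange_replicate _ _ _ _ (i+1)
      (by
        have := PySem.Int.mod_lt (n0 - R) (b := ((i + 1 : Nat) : Int)) (by omega)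
        omega)]
    rw [pv_sqfold]
    rw [pv_finish (i+1) (by omega) (n0 - R) _ (by omega)]
    -- B side
    rw [pvLoopB]
    rw [dif_neg (show ¬ i < ws0.length - 1 by omega)]
    simp only [pvFinishB]
    have hv : PySem.List.pyGetD ws0 ((i : Nat) : Int) 0 = ws0[i]?.getD 0 := by
      rw [PySem.List.pyGetD_natCast, List.getD_eq_getElem?_getD]
    rw [hv]
    have hdropi : ws0.drop i = [ws0[i]?.getD 0] := by
      rw [List.drop_eq_getElem_cons hik, List.getElem?_eq_getElem hik]
      have : ws0.drop (i+1) = [] := hnil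
      simp [this]
    rw [hT, hdropi]
    have harg : R - n0 = -(n0 - R) := by ring
    rw [harg]
    simp only [List.map_nil, List.map_cons, List.sum_nil, List.sum_cons]
    push_cast
    ring
  | succ j ih =>
    intro i hj hik R hR T hT
    have hik1 : i + 1 < ws0.length := by omega
    have hrange : PySem.List.pyRange (i : Int) ((ws0.length : Int) - 1) 1
        = (i : Int) :: PySem.List.pyRange ((i : Int) + 1) ((ws0.length : Int) - 1) 1 :=
      PySem.List.pyRange_one_cons (by omega)
    rw [hrange]
    simp only [pvLoopA]
    rw [if_neg (show ¬ n0 - R ≤ 0 by omega)]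
    have hv' : PySem.List.pyGetD (List.replicate (i + 1) (ws0[i]?.getD 0) ++ ws0.drop (i + 1)) (i : Int) 0
        = ws0[i]?.getD 0 := pv_state_get_lt i (i+1) _ _ (by omega)
    have hcast1 : ((i : Int) + 1) = ((i + 1 : Nat) : Int) := by push_cast; ring
    have hw' : PySem.List.pyGetD (List.replicate (i + 1) (ws0[i]?.getD 0) ++ ws0.drop (i + 1)) ((i : Int) + 1) 0
        = ws0[i+1]?.getD 0 := by
      rw [hcast1, pv_state_get_next]
      rw [List.getElem?_drop]
    rw [hv', hw']
    -- B-side reads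
    have hv0 : PySem.List.pyGetD ws0 (i : Int) 0 = ws0[i]?.getD 0 := by
      rw [PySem.List.pyGetD_natCast, List.getD_eq_getElem?_getD]
    have hw0 : PySem.List.pyGetD ws0 ((i : Int) + 1) 0 = ws0[i+1]?.getD 0 := by
      rw [hcast1, PySem.List.pyGetD_natCast, List.getD_eq_getElem?_getD]
    have hdropi : ws0.drop i = ws0[i]?.getD 0 :: ws0.drop (i + 1) := by
      rw [List.drop_eq_getElem_cons hik, List.getElem?_eq_getElem hik]
      rfl
    have hT' : T - ws0[i]?.getD 0 * ws0[i]?.getD 0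
        = ((ws0.drop (i + 1)).map (fun w => w * w)).sum := by
      rw [hT, hdropi]; simp only [List.map_cons, List.sum_cons]; ring
    rw [pvLoopB, dif_pos (show i < ws0.length - 1 by omega)]
    simp only [hv0, hw0]
    by_cases htmp : ws0[i]?.getD 0 - ws0[i+1]?.getD 0 = 0
    · rw [if_pos htmp]
      have hvw : ws0[i]?.getD 0 = ws0[i+1]?.getD 0 := by omega
      rw [if_pos (show R + ((i : Int) + 1) * (ws0[i]?.getD 0 - ws0[i+1]?.getD 0) < n0 by
        rw [htmp, mul_zero, add_zero]; exact hR)]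
      rw [htmp, mul_zero, add_zero]
      rw [hvw, pv_merge i _ ws0 hik1 rfl]
      have := ih (i + 1) (by omega) hik1 R hR
        (T - ws0[i]?.getD 0 * ws0[i]?.getD 0) hT'
      rw [hcast1]
      convert this using 4
      rw [hvw]
    · rw [if_neg htmp]
      by_cases hbig : n0 - R > ((i : Int) + 1) * (ws0[i]?.getD 0 - ws0[i+1]?.getD 0)
      · rw [if_pos hbig]
        rw [if_pos (show R + ((i : Int) + 1) * (ws0[i]?.getD 0 - ws0[i+1]?.getD 0) < n0 by omega)]
        have hsub : pvSubRange (List.replicate (i + 1) (ws0[i]?.getD 0) ++ ws0.drop (i + 1))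
              ((i : Int) + 1) (ws0[i]?.getD 0 - ws0[i+1]?.getD 0)
            = List.replicate (i + 2) (ws0[i+1]?.getD 0) ++ ws0.drop (i + 2) := by
          rw [hcast1, pv_subRange_replicate _ _ _ (i+1) (i+1) (Nat.le_refl _)]
          have hx : ws0[i]?.getD 0 - (ws0[i]?.getD 0 - ws0[i+1]?.getD 0) = ws0[i+1]?.getD 0 := by ring
          rw [hx]
          simp only [Nat.sub_self, List.replicate_zero, List.append_nil]
          exact pv_merge i _ ws0 hik1 rfl
        rw [hsub]
        have hn' : n0 - R - ((i : Int) + 1) * (ws0[i]?.getD 0 - ws0[i+1]?.getD 0)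
            = n0 - (R + ((i : Int) + 1) * (ws0[i]?.getD 0 - ws0[i+1]?.getD 0)) := by ring
        rw [hn']
        have := ih (i + 1) (by omega) hik1
          (R + ((i : Int) + 1) * (ws0[i]?.getD 0 - ws0[i+1]?.getD 0)) (by omega)
          (T - ws0[i]?.getD 0 * ws0[i]?.getD 0) hT'
        rw [hcast1]
        exact this
      · rw [if_neg hbig]
        rw [if_neg (show ¬ (R + ((i : Int) + 1) * (ws0[i]?.getD 0 - ws0[i+1]?.getD 0) < n0) by omega)]
        simp only [pvPost]
        rw [if_neg (show ¬ ((0 : Int) > 0) by omega)]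
        rw [hcast1, pv_subRange_replicate _ _ _ (i+1) (i+1) (Nat.le_refl _)]
        have hshape : List.replicate (i+1) (ws0[i]?.getD 0 - PySem.Int.floordiv (n0 - R) ((i+1 : Nat) : Int))
              ++ List.replicate ((i+1) - (i+1)) (ws0[i]?.getD 0) ++ ws0.drop (i + 1)
            = List.replicate (i+1) (ws0[i]?.getD 0 - PySem.Int.floordiv (n0 - R) ((i+1 : Nat) : Int))
              ++ ws0.drop (i + 1) := by simp
        rw [hshape]
        have hmodcast : PySem.Int.mod (n0 - R) ((i + 1 : Nat) : Int)
            = (((PySem.Int.mod (n0 - R) ((i + 1 : Nat) : Int)).toNat : Nat) : Int) := by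
          have := PySem.Int.mod_nonneg (n0 - R) (b := ((i + 1 : Nat) : Int)) (by omega)
          omega
        rw [hmodcast, pv_subRange_replicate _ _ _ _ (i+1)
          (by
            have := PySem.Int.mod_lt (n0 - R) (b := ((i + 1 : Nat) : Int)) (by omega)
            omega)]
        rw [pv_sqfold]
        rw [pv_finish (i+1) (by omega) (n0 - R) _ (by omega)]
        simp only [pvFinishB]
        rw [hv0]
        have harg : R - n0 = -(n0 - R) := by ring
        rw [harg, ← hT']
        push_cast
        ring

theorem solution_eq (n : Int) (works : List Int) : solution n works = solution_alt n works := by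
  unfold solution solution_alt
  by_cases hsum : works.sum ≤ n
  · rw [if_pos hsum, if_pos hsum]
  · rw [if_neg hsum, if_neg hsum]
    simp only []
    have hperm : (PySem.List.sorted works (fun x => x) true).Perm works :=
      PySem.List.sorted_perm works (fun x => x) true
    by_cases hn : n ≤ 0
    · rw [if_pos hn]
      have hstop : pvLoopA (PySem.List.pyRange 0 (((PySem.List.sorted works (fun x => x) true).length : Int) - 1) 1)
          (PySem.List.sorted works (fun x => x) true, n)
          = (PySem.List.sorted works (fun x => x) true, n) := by
        cases PySem.List.pyRange 0 (((PySem.List.sorted works (fun x => x) true).length : Int) - 1) 1 with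
        | nil => rfl
        | cons a l => simp [pvLoopA, hn]
      rw [hstop]
      have hpost : pvPost (PySem.List.sorted works (fun x => x) true, n)
          = PySem.List.sorted works (fun x => x) true := by
        rw [pvPost, if_neg (by simpa using hn)]
      rw [hpost, pv_sqfold]
      have := (hperm.map (fun w => w * w)).sum_eq
      simp only [zero_add]
      rw [← this]
    · rw [if_neg hn]
      have hne : works ≠ [] := by
        intro h; subst h; simp at hsum; omega
      have hl0 : 0 < (PySem.List.sorted works (fun x => x) true).length := by
        rw [PySem.List.length_sorted]
        exact List.length_pos_of_ne_nil hne
      have hws0 : List.replicate (0 + 1) ((PySem.List.sorted works (fun x => x) true)[0]?.getD 0)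
            ++ (PySem.List.sorted works (fun x => x) true).drop (0 + 1)
          = PySem.List.sorted works (fun x => x) true := by
        have h0 := List.drop_eq_getElem_cons (l := PySem.List.sorted works (fun x => x) true) (i := 0) hl0
        simp only [List.drop_zero] at h0
        rw [List.getElem?_eq_getElem hl0]
        simpa using h0.symm
      have hT : ((works.map (fun w => w * w)).sum : Int)
          = (((PySem.List.sorted works (fun x => x) true).drop 0).map (fun w => w * w)).sum := by
        simp only [List.drop_zero]
        exact ((hperm.map (fun w => w * w)).sum_eq).symm
      have hmain := pv_main (PySem.List.sorted works (fun x => x) true) n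
        ((PySem.List.sorted works (fun x => x) true).length - 1 - 0) 0 rfl hl0 0 (by omega)
        ((works.map (fun w => w * w)).sum) hT
      simp only [Nat.cast_zero, sub_zero, hws0] at hmain
      exact hmain

-- ===== VERDICT (by name: the statement is the Claim_ definition above) =====
theorem solution_spec : Claim_equal_solution := by
  intro n works _
  unfold Spec_solution
  exact solution_eq n works
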